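-- pv_equiv track=rewrite | github.com/ksahlin/IsoCon | modules/functions.py | order_pairwise_alignments
-- ===== SOURCE A (Python) =====
-- def order_pairwise_alignments(target_aligned, query_aligned):
--     """
--         input:      0-indexed target positions
--         returns:    target vector is a list of 2*t_len +1 positions to keep insertions between base pairs
--                 list of strings of nucleotides for each position, start position in target vector list, end position in target vector list
--     """
--
--     query_positioned = []
--     target_position = 0 # 0-indexed
--     temp_ins = ""
--     # iterating over alignment positions
--     for p in range(len(target_aligned)):
--         if target_aligned[p] == "-":
--             temp_ins += query_aligned[p]
--         else:
--             if not temp_ins: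
--                 query_positioned.append("-")
--             else:
--                 query_positioned.append(temp_ins)
--                 temp_ins = ""
--
--             query_positioned.append(query_aligned[p])
--
--             target_position += 1
--
--     if not temp_ins:
--         query_positioned.append("-")
--     else:
--         query_positioned.append(temp_ins)
--
--     return query_positioned
-- ===== SOURCE B (Python) =====
-- def order_pairwise_alignments(target_aligned, query_aligned):
--     n = len(target_aligned)
--     bases = [i for i, c in enumerate(target_aligned) if c != '-']
--     query_positioned = []
--     prev = -1
--     for i in bases:
--         ins = query_aligned[prev + 1:i]
--         query_positioned.append(ins if ins else "-")
--         query_positioned.append(query_aligned[i])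
--         prev = i
--     tail = query_aligned[prev + 1:n]
--     query_positioned.append(tail if tail else "-")
--     return query_positioned
-- ===== Notes on version B (the rewrite author's own statement) =====
-- stated objective: alternative
-- what changed: Replaces the character-by-character loop with a mutable insertion accumulator by a two-pass decomposition: first collect the indices of non-gap target positions, then emit for each base the preceding insertion as a slice query[prev+1:i] plus the base character, and finally the trailing slice capped at len(target).
import Mathlib
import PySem

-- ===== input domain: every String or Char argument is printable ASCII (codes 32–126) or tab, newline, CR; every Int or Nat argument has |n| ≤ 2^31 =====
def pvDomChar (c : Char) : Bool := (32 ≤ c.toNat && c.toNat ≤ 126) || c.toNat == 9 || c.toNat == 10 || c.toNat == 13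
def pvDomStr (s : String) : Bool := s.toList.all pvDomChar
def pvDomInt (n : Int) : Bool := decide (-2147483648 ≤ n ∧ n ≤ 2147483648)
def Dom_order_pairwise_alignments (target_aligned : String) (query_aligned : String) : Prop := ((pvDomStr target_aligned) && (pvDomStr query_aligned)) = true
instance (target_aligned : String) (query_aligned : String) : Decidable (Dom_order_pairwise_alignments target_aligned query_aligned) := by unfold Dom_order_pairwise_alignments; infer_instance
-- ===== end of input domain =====

-- B replaces A's single char-by-char loop (insertion accumulator) by two passes: collect
-- non-gap target indices, then emit slices between consecutive base indices. Same values on Pre_.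

-- ===== PORT A =====
-- loop body of A (state = (query_positioned, target_position, temp_ins as char list))
def opaStepA (st : List String × Int × List Char) (pc : Char × Char) : List String × Int × List Char :=
  if pc.1 = '-' then (st.1, st.2.1, st.2.2 ++ [pc.2])
  else
    let qp := if st.2.2 = [] then st.1 ++ ["-"] else st.1 ++ [String.ofList st.2.2]
    (qp ++ [String.ofList [pc.2]], st.2.1 + 1, ([] : List Char))

-- post-loop flush of temp_ins
def opaFin (st : List String × Int × List Char) : List String :=
  if st.2.2 = [] then st.1 ++ ["-"] else st.1 ++ [String.ofList st.2.2]

-- A's 'for p in range(len(target_aligned))' reads target_aligned[p] and query_aligned[p];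
-- on Pre_ (len target ≤ len query) this is exactly a fold over the zip of the two char lists.
def order_pairwise_alignments (target_aligned : String) (query_aligned : String) : List String :=
  opaFin ((target_aligned.toList.zip query_aligned.toList).foldl opaStepA ([], 0, []))

-- ===== PORT B =====
-- B's 'for i in bases' loop; prev starts at -1; slices via PySem (never raise, like Python slices);
-- query_aligned[i] via pyGetD (exact on Pre_, where every base index is in range).
def opaAltGo (ql : List Char) (n : Nat) : List Int → Int → List String → List String
  | [], prev, acc =>
      let tail := PySem.List.slice ql (some (prev + 1)) (some (n : Int))
      acc ++ [if tail = [] then "-" else String.ofList tail]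
  | i :: rest, prev, acc =>
      let ins := PySem.List.slice ql (some (prev + 1)) (some i)
      opaAltGo ql n rest i
        (acc ++ [if ins = [] then "-" else String.ofList ins, String.ofList [PySem.List.pyGetD ql i '?']])

def order_pairwise_alignments_alt (target_aligned : String) (query_aligned : String) : List String :=
  let tl := target_aligned.toList
  let bases := ((PySem.List.enumerate tl 0).filter (fun p => p.2 != '-')).map (·.1)
  opaAltGo query_aligned.toList tl.length bases (-1) []

-- ===== PRECONDITION & SPEC =====
-- A indexes query_aligned[p] at every alignment position p, so it raises IndexError exactly
-- when the query string is shorter than the target string; those inputs are excluded.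
def Pre_order_pairwise_alignments (target_aligned : String) (query_aligned : String) : Prop :=
  target_aligned.toList.length ≤ query_aligned.toList.length
instance (target_aligned : String) (query_aligned : String) : Decidable (Pre_order_pairwise_alignments target_aligned query_aligned) := by unfold Pre_order_pairwise_alignments; infer_instance

def pvWitness_order_pairwise_alignments : String × String := ("A-", "AC")

def Spec_order_pairwise_alignments (target_aligned : String) (query_aligned : String) (out : List String) : Prop := out = order_pairwise_alignments_alt target_aligned query_aligned
instance (target_aligned : String) (query_aligned : String) (out : List String) : Decidable (Spec_order_pairwise_alignments target_aligned query_aligned out) := by unfold Spec_order_pairwise_alignments; infer_instance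

-- ===== CLAIM (what is proved, stated in full; the proofs are below) =====
def Claim_equal_order_pairwise_alignments : Prop := ∀ (target_aligned : String) (query_aligned : String), Dom_order_pairwise_alignments target_aligned query_aligned → Pre_order_pairwise_alignments target_aligned query_aligned → Spec_order_pairwise_alignments target_aligned query_aligned (order_pairwise_alignments target_aligned query_aligned)

-- ===== LEMMAS AND PROOFS =====

-- recursive characterization of B's enumerate/filter/map base-index list
def opaBases : Nat → List Char → List Int
  | _, [] => []
  | k, c :: s => if c = '-' then opaBases (k + 1) s else (k : Int) :: opaBases (k + 1) s

lemma opaBases_eq : ∀ (s : List Char) (k : Nat),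
    ((PySem.List.enumerate s (k : Int)).filter (fun p => p.2 != '-')).map (·.1) = opaBases k s := by
  intro s
  induction s with
  | nil => intro k; simp [PySem.List.enumerate_nil, opaBases]
  | cons c s ih =>
      intro k
      have h := ih (k + 1)
      rw [(by push_cast; ring : (((k + 1 : Nat) : Int)) = ((k : Int) + 1))] at h
      rw [PySem.List.enumerate_cons]
      by_cases hc : c = '-' <;> simp [opaBases, hc, h]

lemma opaBases_eq0 (s : List Char) :
    ((PySem.List.enumerate s 0).filter (fun p => p.2 != '-')).map (·.1) = opaBases 0 s := by
  simpa using opaBases_eq s 0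

lemma opa_main (ql : List Char) (n : Nat) :
    ∀ (s : List Char) (k m : Nat) (acc : List String) (tp : Int),
      k + s.length = n → n ≤ ql.length → m ≤ k →
      opaFin ((s.zip (ql.drop k)).foldl opaStepA (acc, tp, (ql.drop m).take (k - m)))
        = opaAltGo ql n (opaBases k s) ((m : Int) - 1) acc := by
  intro s
  induction s with
  | nil =>
      intro k m acc tp hk hn hm
      have hk' : k = n := by simpa using hk
      subst hk'
      simp only [List.zip_nil_left, List.foldl_nil, opaFin, opaBases, opaAltGo]
      rw [(by ring : ((m : Int) - 1 + 1) = (m : Int)), PySem.List.slice_natCast]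
      split_ifs <;> rfl
  | cons c s ih =>
      intro k m acc tp hk hn hm
      have hkn : k < n := by simp at hk; omega
      have hkl : k < ql.length := lt_of_lt_of_le hkn hn
      have hdrop : ql.drop k = ql[k] :: ql.drop (k + 1) := List.drop_eq_getElem_cons hkl
      rw [hdrop]
      simp only [List.zip_cons_cons, List.foldl_cons]
      by_cases hc : c = '-'
      · -- gap position: A extends the insertion accumulator by one character
        have hins : (ql.drop m).take (k - m) ++ [ql[k]] = (ql.drop m).take (k + 1 - m) := by
          have h1 : k - m < (ql.drop m).length := by simp [List.length_drop]; omega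
          have h2 : (ql.drop m).take (k - m + 1)
              = (ql.drop m).take (k - m) ++ [(ql.drop m)[k - m]] := by
            rw [List.take_add_one]
            simp [List.getElem?_eq_getElem h1]
          have h3 : (ql.drop m)[k - m]'h1 = ql[k] := by
            rw [List.getElem_drop]
            congr 1
            omega
          rw [(by omega : k + 1 - m = k - m + 1), h2, h3]
        have hstep : opaStepA (acc, tp, (ql.drop m).take (k - m)) (c, ql[k])
            = (acc, tp, (ql.drop m).take (k + 1 - m)) := by
          simp [opaStepA, hc, hins]
        rw [hstep]
        have := ih (k + 1) m acc tp (by simp at hk ⊢; omega) hn (by omega)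
        simpa [opaBases, hc] using this
      · -- base position: A flushes the insertion and emits the base character
        have hins : PySem.List.slice ql (some ((m : Int) - 1 + 1)) (some (k : Int))
            = (ql.drop m).take (k - m) := by
          rw [(by ring : ((m : Int) - 1 + 1) = (m : Int)), PySem.List.slice_natCast]
        have hget : PySem.List.pyGetD ql ((k : Nat) : Int) '?' = ql[k] := by
          rw [PySem.List.pyGetD_natCast]
          exact List.getD_eq_getElem ql '?' hkl
        have hstep : opaStepA (acc, tp, (ql.drop m).take (k - m)) (c, ql[k])
            = ((if (ql.drop m).take (k - m) = [] then acc ++ ["-"]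
                else acc ++ [String.ofList ((ql.drop m).take (k - m))]) ++ [String.ofList [ql[k]]],
               tp + 1, ([] : List Char)) := by
          simp [opaStepA, hc]
        rw [hstep]
        have hrhs : opaAltGo ql n (opaBases k (c :: s)) ((m : Int) - 1) acc
            = opaAltGo ql n (opaBases (k + 1) s) ((k : Nat) : Int)
                (acc ++ [if (ql.drop m).take (k - m) = [] then "-"
                          else String.ofList ((ql.drop m).take (k - m)), String.ofList [ql[k]]]) := by
          simp only [opaBases, hc, if_false, opaAltGo, hins, hget]
        rw [hrhs]
        have hemp : (ql.drop (k + 1)).take (k + 1 - (k + 1)) = ([] : List Char) := by simp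
        have := ih (k + 1) (k + 1)
            (acc ++ [if (ql.drop m).take (k - m) = [] then "-"
                      else String.ofList ((ql.drop m).take (k - m)), String.ofList [ql[k]]])
            (tp + 1) (by simp at hk ⊢; omega) hn (by omega)
        rw [hemp, (by push_cast; ring : (((k + 1 : Nat) : Int) - 1) = ((k : Nat) : Int))] at this
        rw [← this]
        congr 2
        split_ifs <;> simp

-- ===== VERDICT (by name: the statement is the Claim_ definition above) =====
theorem order_pairwise_alignments_spec : Claim_equal_order_pairwise_alignments := by
  intro t q _ hpre
  show opaFin ((t.toList.zip q.toList).foldl opaStepA ([], 0, []))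
      = opaAltGo q.toList t.toList.length
          (((PySem.List.enumerate t.toList 0).filter (fun p => p.2 != '-')).map (·.1)) (-1) []
  rw [opaBases_eq0 t.toList]
  have := opa_main q.toList t.toList.length t.toList 0 0 [] 0 (by omega) hpre (by omega)
  simpa using this
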